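-- pv_equiv track=rewrite | github.com/StefanS97/free-time-fun-python | printer_errors.py | printer_error
-- ===== SOURCE A (Python) =====
-- def printer_error(s):
--     lower_case = s.lower()
--     errors = 0
--     total_count = 0
--     for i in range(len(lower_case)):
--         ch = ord(lower_case[i])
--         if ch < 97 or ch > 109:
--             errors += 1
--         total_count += 1
--
--     return f'{errors}/{total_count}'
-- ===== SOURCE B (Python) =====
-- def printer_error(s):
--     counts = {}
--     for c in s.lower():
--         counts[c] = counts.get(c, 0) + 1
--     total = len(s)
--     in_range = sum(counts.get(c, 0) for c in 'abcdefghijklm')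
--     return f'{total - in_range}/{total}'
-- ===== Notes on version B (the rewrite author's own statement) =====
-- stated objective: alternative
-- what changed: Replaced A's per-character ord-range branch inside an index loop by building a frequency table of the lowered string and then aggregating it over the fixed 13-letter in-range key set (errors = total - in_range).
import Mathlib
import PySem

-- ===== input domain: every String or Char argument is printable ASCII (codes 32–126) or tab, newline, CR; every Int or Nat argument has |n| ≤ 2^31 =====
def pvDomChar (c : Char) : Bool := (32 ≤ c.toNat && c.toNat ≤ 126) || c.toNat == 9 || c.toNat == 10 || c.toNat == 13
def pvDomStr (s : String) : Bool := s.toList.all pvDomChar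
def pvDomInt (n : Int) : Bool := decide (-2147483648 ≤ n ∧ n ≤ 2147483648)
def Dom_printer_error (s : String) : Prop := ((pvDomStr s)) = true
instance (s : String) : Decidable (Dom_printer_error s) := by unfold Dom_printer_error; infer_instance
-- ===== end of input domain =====

-- B replaces A's per-character range branch with a frequency table of s.lower() aggregated over
-- the fixed 13-letter in-range key set (errors = total - in_range); objective: alternative, same cost.

-- ===== PORT A =====
-- A: lower the string, loop over its indices, branch on ord(ch) outside 97..109,
-- incrementing errors and total_count; return f'{errors}/{total_count}'.
def printer_error (s : String) : String :=
  let lower_case := PySem.Chars.lower s.toList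
  let st := (PySem.List.pyRange 0 (lower_case.length : Int)).foldl
      (fun (st : Int × Int) i =>
        (if ((PySem.List.pyGetD lower_case i ' ').toNat : Int) < 97 ∨
            ((PySem.List.pyGetD lower_case i ' ').toNat : Int) > 109
         then st.1 + 1 else st.1, st.2 + 1))
      (0, 0)
  PySem.Int.toStr st.1 ++ "/" ++ PySem.Int.toStr st.2

-- ===== PORT B =====
-- B (Source B): build counts = frequency dict of s.lower(); total = len(s);
-- in_range = sum of counts over the 13 in-range letter keys; return f'{total - in_range}/{total}'.
def printer_error_alt (s : String) : String :=
  let counts := (PySem.Str.lower s).toList.foldl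
      (fun (d : PySem.Dict Char Int) c => d.insert c (d.getD c 0 + 1)) PySem.Dict.empty
  let total : Int := PySem.Str.len s
  let in_range : Int := "abcdefghijklm".toList.foldl (fun acc c => acc + counts.getD c 0) 0
  PySem.Int.toStr (total - in_range) ++ "/" ++ PySem.Int.toStr total

-- ===== PRECONDITION & SPEC =====
def Spec_printer_error (s : String) (out : String) : Prop := out = printer_error_alt s
instance (s : String) (out : String) : Decidable (Spec_printer_error s out) := by unfold Spec_printer_error; infer_instance

-- ===== CLAIM (what is proved, stated in full; the proofs are below) =====
def Claim_equal_printer_error : Prop := ∀ (s : String), Dom_printer_error s → Spec_printer_error s (printer_error s)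

-- ===== LEMMAS AND PROOFS =====

-- countP of "code point outside 97..109" equals length minus the counts of the 13 in-range letters
lemma pv_countP_eq (l : List Char) :
    ((l.countP (fun c => decide ((c.toNat : Int) < 97 ∨ (c.toNat : Int) > 109)) : Int))
      = (l.length : Int) -
        ((((((((((((((l.count 'a' : Int) + l.count 'b') + l.count 'c') + l.count 'd') + l.count 'e')
          + l.count 'f') + l.count 'g') + l.count 'h') + l.count 'i') + l.count 'j') + l.count 'k')
          + l.count 'l') + l.count 'm')) := by
  induction l with
  | nil => simp
  | cons c l ih =>
    by_cases h : 97 <= c.toNat ∧ c.toNat <= 109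
    · obtain ⟨h1, h2⟩ := h
      have h13 : c.toNat = 97 ∨ c.toNat = 98 ∨ c.toNat = 99 ∨ c.toNat = 100 ∨ c.toNat = 101 ∨ c.toNat = 102 ∨ c.toNat = 103 ∨ c.toNat = 104 ∨ c.toNat = 105 ∨ c.toNat = 106 ∨ c.toNat = 107 ∨ c.toNat = 108 ∨ c.toNat = 109 := by omega
      have hc : c = 'a' ∨ c = 'b' ∨ c = 'c' ∨ c = 'd' ∨ c = 'e' ∨ c = 'f' ∨ c = 'g' ∨ c = 'h' ∨ c = 'i' ∨ c = 'j' ∨ c = 'k' ∨ c = 'l' ∨ c = 'm' := by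
        rcases h13 with h|h|h|h|h|h|h|h|h|h|h|h|h
        · exact Or.inl (by rw [← Char.ofNat_toNat c, h])
        · exact Or.inr <| Or.inl (by rw [← Char.ofNat_toNat c, h])
        · exact Or.inr <| Or.inr <| Or.inl (by rw [← Char.ofNat_toNat c, h])
        · exact Or.inr <| Or.inr <| Or.inr <| Or.inl (by rw [← Char.ofNat_toNat c, h])
        · exact Or.inr <| Or.inr <| Or.inr <| Or.inr <| Or.inl (by rw [← Char.ofNat_toNat c, h])
        · exact Or.inr <| Or.inr <| Or.inr <| Or.inr <| Or.inr <| Or.inl (by rw [← Char.ofNat_toNat c, h])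
        · exact Or.inr <| Or.inr <| Or.inr <| Or.inr <| Or.inr <| Or.inr <| Or.inl (by rw [← Char.ofNat_toNat c, h])
        · exact Or.inr <| Or.inr <| Or.inr <| Or.inr <| Or.inr <| Or.inr <| Or.inr <| Or.inl (by rw [← Char.ofNat_toNat c, h])
        · exact Or.inr <| Or.inr <| Or.inr <| Or.inr <| Or.inr <| Or.inr <| Or.inr <| Or.inr <| Or.inl (by rw [← Char.ofNat_toNat c, h])
        · exact Or.inr <| Or.inr <| Or.inr <| Or.inr <| Or.inr <| Or.inr <| Or.inr <| Or.inr <| Or.inr <| Or.inl (by rw [← Char.ofNat_toNat c, h])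
        · exact Or.inr <| Or.inr <| Or.inr <| Or.inr <| Or.inr <| Or.inr <| Or.inr <| Or.inr <| Or.inr <| Or.inr <| Or.inl (by rw [← Char.ofNat_toNat c, h])
        · exact Or.inr <| Or.inr <| Or.inr <| Or.inr <| Or.inr <| Or.inr <| Or.inr <| Or.inr <| Or.inr <| Or.inr <| Or.inr <| Or.inl (by rw [← Char.ofNat_toNat c, h])
        · exact Or.inr <| Or.inr <| Or.inr <| Or.inr <| Or.inr <| Or.inr <| Or.inr <| Or.inr <| Or.inr <| Or.inr <| Or.inr <| Or.inr <| (by rw [← Char.ofNat_toNat c, h])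
      rcases hc with hc|hc|hc|hc|hc|hc|hc|hc|hc|hc|hc|hc|hc <;> subst hc <;>
        simp at ih ⊢ <;> omega
    · have hp : (c.toNat : Int) < 97 ∨ (c.toNat : Int) > 109 := by omega
      have hne : ∀ x : Char, 97 <= x.toNat → x.toNat <= 109 → ¬(c = x) := by
        intro x hx1 hx2 hx; subst hx; exact h ⟨hx1, hx2⟩
      simp only [List.countP_cons, List.count_cons, List.length_cons, decide_eq_true_eq, beq_iff_eq]
      rw [if_pos hp, if_neg (hne 'a' (by decide) (by decide)), if_neg (hne 'b' (by decide) (by decide)), if_neg (hne 'c' (by decide) (by decide)), if_neg (hne 'd' (by decide) (by decide)), if_neg (hne 'e' (by decide) (by decide)), if_neg (hne 'f' (by decide) (by decide)), if_neg (hne 'g' (by decide) (by decide)), if_neg (hne 'h' (by decide) (by decide)), if_neg (hne 'i' (by decide) (by decide)), if_neg (hne 'j' (by decide) (by decide)), if_neg (hne 'k' (by decide) (by decide)), if_neg (hne 'l' (by decide) (by decide)), if_neg (hne 'm' (by decide) (by decide))]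
      push_cast
      omega


-- ===== VERDICT (by name: the statement is the Claim_ definition above) =====
theorem printer_error_spec : Claim_equal_printer_error := by
  intro s _
  unfold Spec_printer_error printer_error printer_error_alt
  simp only [PySem.Str.toList_lower, PySem.Str.len_eq, PySem.Dict.foldl_insert_getD_add_one_eq_counter]
  rw [PySem.List.foldl_pyRange_zero_pyGetD' (PySem.Chars.lower s.toList) ' '
      (fun (st : Int × Int) c => (if ((c.toNat : Int) < 97 ∨ (c.toNat : Int) > 109) then st.1 + 1 else st.1, st.2 + 1)) ((0:Int),(0:Int))]
  rw [PySem.List.foldl_prod_mk (f := fun (a : Int) (c : Char) => if ((c.toNat : Int) < 97 ∨ (c.toNat : Int) > 109) then a + 1 else a) (g := fun (a : Int) (_ : Char) => a + 1)]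
  rw [PySem.List.foldl_ite_add_one (fun (c : Char) => ((c.toNat : Int) < 97 ∨ (c.toNat : Int) > 109))]
  rw [show "abcdefghijklm".toList = ['a','b','c','d','e','f','g','h','i','j','k','l','m'] from rfl]
  simp only [List.foldl, PySem.Dict.getD_counter]
  have hlen : (PySem.Chars.lower s.toList).length = s.toList.length := by
    simp [PySem.Chars.lower]
  congr 1
  · congr 1
    apply congrArg
    have hcp := pv_countP_eq (PySem.Chars.lower s.toList)
    rw [hlen] at hcp
    omega
  · apply congrArg
    rw [PySem.List.foldl_add (g := fun (_ : Char) => (1:Int))]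
    simp [List.map_const', List.sum_replicate, hlen]
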